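-- pv_equiv track=rewrite | github.com/biplobmahadi/dsa-revisit | algo/dp/unBoundedKnapsack.py | rec
-- ===== SOURCE A (Python) =====
-- def rec(i, p, w, c):
--     if i == len(p):
--         return 0
--     maxProfit = rec(i+1, p, w, c)
--     newC = c - w[i]
--     if newC >=0:
--         inc = rec(i, p, w, newC) + p[i]
--         maxProfit = max(inc, maxProfit)
--     return maxProfit
-- ===== SOURCE B (Python) =====
-- def _best(items, dp, cap):
--     """Best profit at exactly capacity `cap`, given dp[x] = best profit for every
--     capacity x < cap (items may be reused any number of times)."""
--     best = 0
--     for wt, pr in items: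
--         if wt <= cap:
--             cand = dp[cap - wt] + pr
--             if best < cand:
--                 best = cand
--     return best
--
--
-- def rec(i, p, w, c):
--     # Bottom-up 1D unbounded-knapsack DP table over the capacity instead of A's
--     # take/skip branching recursion.
--     items = [(w[j], p[j]) for j in range(i, len(p))]
--     if c < 0:
--         return 0
--     dp = [0]
--     for cap in range(1, c + 1):
--         dp.append(_best(items, dp, cap))
--     return dp[c]
-- ===== Notes on version B (the rewrite author's own statement) =====
-- stated objective: alternative
-- what changed: Replaced A's take/skip branching recursion by a bottom-up one-dimensional unbounded-knapsack DP table indexed by capacity.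
-- outside the precondition, e.g. on rec(-2, [5], [9, 9], 3): A returns 0, B raises IndexError
import Mathlib
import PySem

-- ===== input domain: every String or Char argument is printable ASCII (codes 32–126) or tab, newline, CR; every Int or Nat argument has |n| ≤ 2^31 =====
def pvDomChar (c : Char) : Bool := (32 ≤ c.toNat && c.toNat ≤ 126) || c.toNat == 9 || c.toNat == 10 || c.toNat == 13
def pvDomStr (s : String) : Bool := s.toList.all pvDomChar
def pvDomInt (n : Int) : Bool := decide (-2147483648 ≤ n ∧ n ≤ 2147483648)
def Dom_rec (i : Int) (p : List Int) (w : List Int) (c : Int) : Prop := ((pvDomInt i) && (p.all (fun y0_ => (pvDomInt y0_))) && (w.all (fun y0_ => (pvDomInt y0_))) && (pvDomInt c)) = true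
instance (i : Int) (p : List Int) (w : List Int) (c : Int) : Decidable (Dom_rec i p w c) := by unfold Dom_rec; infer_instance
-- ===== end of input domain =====

-- B replaces A's take/skip branching recursion by a bottom-up 1D unbounded-knapsack
-- DP table over the capacity (objective: alternative).

-- ===== PORT A =====
-- Literal port of A's recursion.  pyGet? gives Python's negative-index wraparound; the
-- bounds check `i < len p` and the extra conjunct `newC < c` only make the recursion
-- total in Lean: on every input admitted by Pre_rec they coincide with what the Python
-- evaluates (Python raises or recurses forever exactly where they disagree).
def rec (i : Int) (p : List Int) (w : List Int) (c : Int) : Int :=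
  if i = (p.length : Int) then 0
  else if _h1 : i < (p.length : Int) then
    let maxProfit := rec (i + 1) p w c
    let newC := c - (PySem.List.pyGet? w i).getD 0
    if _h2 : 0 ≤ newC ∧ newC < c then
      max (rec i p w newC + (PySem.List.pyGet? p i).getD 0) maxProfit
    else maxProfit
  else 0
termination_by ((p.length - i).toNat, c.toNat)
decreasing_by
  · exact Prod.Lex.left _ _ (by omega)
  · exact Prod.Lex.right _ (by omega)

-- ===== PORT B =====
-- helper `_best` of Source B: best profit at exactly capacity `cap`, reading the table dp
def bestAt (items : List (Int × Int)) (dp : List Int) (cap : Int) : Int :=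
  items.foldl
    (fun best x =>
      if x.1 ≤ cap then
        let cand := (PySem.List.pyGet? dp (cap - x.1)).getD 0 + x.2
        if best < cand then cand else best
      else best) 0

def rec_alt (i : Int) (p : List Int) (w : List Int) (c : Int) : Int :=
  let items := (PySem.List.pyRange i (p.length : Int) 1).map
    (fun j => ((PySem.List.pyGet? w j).getD 0, (PySem.List.pyGet? p j).getD 0))
  if c < 0 then 0
  else
    let dp := (PySem.List.pyRange 1 (c + 1) 1).foldl
      (fun dp cap => dp ++ [bestAt items dp cap]) [0]
    (PySem.List.pyGet? dp c).getD 0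

-- ===== PRECONDITION & SPEC =====
-- Pre_rec is where the Python A returns normally: i ≤ len(p) (beyond it the `i == len(p)`
-- stop is never reached and A dies with RecursionError); a negative i must reach back into
-- w and p so that Python's negative-index wraparound reads succeed; and every scanned
-- weight (wrapped reads included) is positive or strictly above c — a weight ≤ 0 that
-- fits under the remaining capacity makes A recurse forever.
def Pre_rec (i : Int) (p : List Int) (w : List Int) (c : Int) : Prop :=
  i ≤ (p.length : Int) ∧ (0 ≤ i ∨ (-(w.length : Int) ≤ i ∧ -(p.length : Int) ≤ i)) ∧
    (∀ t : Nat, t < (-i).toNat →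
      PySem.Raise.InRange w.length (i + (t : Int)) ∧
        (0 < (PySem.List.pyGet? w (i + (t : Int))).getD 0 ∨
          c < (PySem.List.pyGet? w (i + (t : Int))).getD 0)) ∧
    ∀ j : Nat, j < p.length → i ≤ (j : Int) →
      j < w.length ∧ (0 < w.getD j 0 ∨ c < w.getD j 0)
instance (i : Int) (p : List Int) (w : List Int) (c : Int) : Decidable (Pre_rec i p w c) := by
  unfold Pre_rec; infer_instance

def pvWitness_rec : Int × List Int × List Int × Int := (0, [2, 5, 3], [3, 4, 2], 7)

def Spec_rec (i : Int) (p : List Int) (w : List Int) (c : Int) (out : Int) : Prop := out = rec_alt i p w c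
instance (i : Int) (p : List Int) (w : List Int) (c : Int) (out : Int) : Decidable (Spec_rec i p w c out) := by unfold Spec_rec; infer_instance

-- ===== CLAIM (what is proved, stated in full; the proofs are below) =====
def Claim_equal_rec : Prop := ∀ (i : Int) (p : List Int) (w : List Int) (c : Int), Dom_rec i p w c → Pre_rec i p w c → Spec_rec i p w c (rec i p w c)

-- ===== LEMMAS AND PROOFS =====

-- the (possibly wrapped) value both programs read at index j
def wv (l : List Int) (j : Int) : Int := (PySem.List.pyGet? l j).getD 0

theorem rec_base (p w : List Int) (c : Int) : rec (p.length : Int) p w c = 0 := by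
  rw [rec]; simp

theorem rec_step (p w : List Int) (k : Int) (c : Int) (hk : k < (p.length : Int)) :
    rec k p w c =
      if 0 ≤ c - wv w k ∧ c - wv w k < c then
        max (rec k p w (c - wv w k) + wv p k) (rec (k + 1) p w c)
      else rec (k + 1) p w c := by
  rw [rec]
  have h1 : ¬(k = (p.length : Int)) := by omega
  rw [if_neg h1, dif_pos hk]
  rfl

theorem rec_neg (p w : List Int) (i c : Int) (hc : c < 0) : rec i p w c = 0 := by
  by_cases h1 : i = (p.length : Int)
  · rw [h1, rec_base]
  · by_cases h2 : i < (p.length : Int)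
    · rw [rec_step p w i c h2, if_neg (by omega)]
      exact rec_neg p w (i + 1) c hc
    · rw [rec, if_neg h1, dif_neg h2]
termination_by (p.length - i).toNat
decreasing_by omega

theorem rec_nonneg (p w : List Int) (i c : Int) : 0 ≤ rec i p w c := by
  by_cases h1 : i = (p.length : Int)
  · rw [h1, rec_base]
  · by_cases h2 : i < (p.length : Int)
    · have ih := rec_nonneg p w (i + 1) c
      rw [rec_step p w i c h2]
      split_ifs with h3
      · exact le_trans ih (le_max_right _ _)
      · exact ih
    · rw [rec, if_neg h1, dif_neg h2]
termination_by (p.length - i).toNat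
decreasing_by omega

theorem rec_skip (p w : List Int) (k : Int) (c : Int) (hk : k < (p.length : Int)) :
    rec (k + 1) p w c ≤ rec k p w c := by
  rw [rec_step p w k c hk]
  split_ifs with h
  · exact le_max_right _ _
  · exact le_rfl

theorem rec_mono (p w : List Int) (k k' : Int) (c : Int) (h1 : k ≤ k')
    (h2 : k' ≤ (p.length : Int)) : rec k' p w c ≤ rec k p w c := by
  rcases eq_or_lt_of_le h1 with he | hlt
  · rw [he]
  · have ih := rec_mono p w (k + 1) k' c (by omega) h2
    exact le_trans ih (rec_skip p w k c (by omega))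
termination_by (k' - k).toNat
decreasing_by omega

theorem rec_zero (p w : List Int) (k : Int) (hk : k ≤ (p.length : Int))
    (hg : ∀ t : Int, k ≤ t → t < (p.length : Int) → 0 < wv w t) : rec k p w 0 = 0 := by
  rcases eq_or_lt_of_le hk with he | hlt
  · rw [he, rec_base]
  · rw [rec_step p w k 0 hlt, if_neg (by have := hg k le_rfl hlt; omega)]
    exact rec_zero p w (k + 1) (by omega) (fun t ht1 ht2 => hg t (by omega) ht2)
termination_by (p.length - k).toNat
decreasing_by omega

theorem rec_take_self (p w : List Int) (k : Int) (c : Int) (hk : k < (p.length : Int))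
    (hw : 0 < wv w k) (hwc : wv w k ≤ c) :
    rec k p w (c - wv w k) + wv p k ≤ rec k p w c := by
  rw [rec_step p w k c hk, if_pos ⟨by omega, by omega⟩]
  exact le_max_left _ _

theorem rec_take (p w : List Int) (k j : Int) (c : Int)
    (hg : ∀ t : Int, k ≤ t → t < (p.length : Int) → 0 < wv w t)
    (hkj : k ≤ j) (hj : j < (p.length : Int)) (hwc : wv w j ≤ c) :
    rec k p w (c - wv w j) + wv p j ≤ rec k p w c := by
  have hwj : 0 < wv w j := hg j hkj hj
  rcases eq_or_lt_of_le hkj with he | hlt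
  · rw [he]
    exact rec_take_self p w j c hj hwj hwc
  · have hk : k < (p.length : Int) := lt_trans hlt hj
    have hwk : 0 < wv w k := hg k le_rfl hk
    have hg' : ∀ t : Int, k + 1 ≤ t → t < (p.length : Int) → 0 < wv w t :=
      fun t ht1 ht2 => hg t (by omega) ht2
    have hb : rec (k + 1) p w (c - wv w j) + wv p j ≤ rec (k + 1) p w c :=
      rec_take p w (k + 1) j c hg' hlt hj hwc
    have hskip : rec (k + 1) p w c ≤ rec k p w c := rec_skip p w k c hk
    rw [rec_step p w k (c - wv w j) hk]
    split_ifs with hcond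
    · have e : c - wv w j - wv w k = c - wv w k - wv w j := by ring
      rw [e]
      have h1 : rec k p w (c - wv w k - wv w j) + wv p j ≤ rec k p w (c - wv w k) :=
        rec_take p w k j (c - wv w k) hg hkj hj (by omega)
      have h2 : rec k p w (c - wv w k) + wv p k ≤ rec k p w c :=
        rec_take_self p w k c hk hwk (by omega)
      omega
    · omega
termination_by (c.toNat, (j - k).toNat)
decreasing_by
  · exact Prod.Lex.right _ (by omega)
  · exact Prod.Lex.left _ _ (by omega)

-- the items list the DP scans, and the body of bestAt's fold, named for the proofs
def itemsOf (p w : List Int) (k : Int) : List (Int × Int) :=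
  (PySem.List.pyRange k (p.length : Int) 1).map (fun j => (wv w j, wv p j))

def stepB (dp : List Int) (cap : Int) (best : Int) (x : Int × Int) : Int :=
  if x.1 ≤ cap then
    let cand := (PySem.List.pyGet? dp (cap - x.1)).getD 0 + x.2
    if best < cand then cand else best
  else best

theorem bestAt_foldl (items : List (Int × Int)) (dp : List Int) (cap : Int) :
    bestAt items dp cap = items.foldl (stepB dp cap) 0 := rfl

theorem itemsOf_nil (p w : List Int) : itemsOf p w (p.length : Int) = [] := by
  rw [itemsOf, PySem.List.pyRange_one_eq_nil le_rfl, List.map_nil]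

theorem itemsOf_cons (p w : List Int) (k : Int) (hk : k < (p.length : Int)) :
    itemsOf p w k = (wv w k, wv p k) :: itemsOf p w (k + 1) := by
  rw [itemsOf, itemsOf, PySem.List.pyRange_one_cons hk, List.map_cons]

theorem stepB_le (dp : List Int) (cap b : Int) (x : Int × Int) : b ≤ stepB dp cap b x := by
  simp only [stepB]
  split_ifs <;> omega

theorem stepB_mono (dp : List Int) (cap b1 b2 : Int) (x : Int × Int) (h : b1 ≤ b2) :
    stepB dp cap b1 x ≤ stepB dp cap b2 x := by
  simp only [stepB]
  split_ifs <;> omega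

theorem foldl_stepB_mono (dp : List Int) (cap : Int) (js : List (Int × Int)) (b1 b2 : Int)
    (h : b1 ≤ b2) : js.foldl (stepB dp cap) b1 ≤ js.foldl (stepB dp cap) b2 := by
  induction js generalizing b1 b2 with
  | nil => exact h
  | cons j js ih => exact ih _ _ (stepB_mono dp cap b1 b2 j h)

theorem le_foldl_stepB (dp : List Int) (cap : Int) (js : List (Int × Int)) (b : Int) :
    b ≤ js.foldl (stepB dp cap) b := by
  induction js generalizing b with
  | nil => exact le_rfl
  | cons j js ih => exact le_trans (stepB_le dp cap b j) (ih _)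

theorem foldl_stepB_le (dp : List Int) (cap M : Int) (js : List (Int × Int)) (b : Int)
    (hb : b ≤ M) (hj : ∀ j ∈ js, ∀ x, x ≤ M → stepB dp cap x j ≤ M) :
    js.foldl (stepB dp cap) b ≤ M := by
  cases js with
  | nil => exact hb
  | cons j js' =>
      exact foldl_stepB_le dp cap M js' _ (hj j (List.mem_cons_self) b hb)
        (fun j' h' x hx => hj j' (List.mem_cons_of_mem _ h') x hx)

theorem rec_le_foldl (p w dp : List Int) (k : Int) (cap : Int)
    (hg : ∀ t : Int, k ≤ t → t < (p.length : Int) → 0 < wv w t)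
    (hdp : ∀ x : Int, 0 ≤ x → x < cap → (PySem.List.pyGet? dp x).getD 0 = rec k p w x)
    (k' : Int) (hkk' : k ≤ k') (hk' : k' ≤ (p.length : Int)) :
    rec k' p w cap ≤ (itemsOf p w k').foldl (stepB dp cap) 0 := by
  rcases eq_or_lt_of_le hk' with he | hlt
  · rw [he, itemsOf_nil, rec_base]
    exact le_rfl
  · rw [itemsOf_cons p w k' hlt, List.foldl_cons]
    set T := itemsOf p w (k' + 1) with hT
    have ih := rec_le_foldl p w dp k cap hg hdp (k' + 1) (by omega) (by omega)
    rw [← hT] at ih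
    have h0s := stepB_le dp cap 0 (wv w k', wv p k')
    have htail : T.foldl (stepB dp cap) 0 ≤
        T.foldl (stepB dp cap) (stepB dp cap 0 (wv w k', wv p k')) :=
      foldl_stepB_mono dp cap T _ _ h0s
    have hhead : stepB dp cap 0 (wv w k', wv p k') ≤
        T.foldl (stepB dp cap) (stepB dp cap 0 (wv w k', wv p k')) :=
      le_foldl_stepB dp cap T _
    rw [rec_step p w k' cap hlt]
    have hwk' : 0 < wv w k' := hg k' hkk' hlt
    split_ifs with hcond
    · apply max_le
      · have hstep : rec k p w (cap - wv w k') + wv p k' ≤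
            stepB dp cap 0 (wv w k', wv p k') := by
          simp only [stepB]
          rw [hdp (cap - wv w k') (by omega) (by omega)]
          split_ifs <;> omega
        have hmono : rec k' p w (cap - wv w k') ≤ rec k p w (cap - wv w k') :=
          rec_mono p w k k' (cap - wv w k') hkk' (by omega)
        omega
      · omega
    · omega
termination_by (p.length - k').toNat
decreasing_by omega

theorem bestAt_eq (p w dp : List Int) (k : Int) (hk : k ≤ (p.length : Int))
    (hg : ∀ t : Int, k ≤ t → t < (p.length : Int) → 0 < wv w t) (cap : Int)
    (hdp : ∀ x : Int, 0 ≤ x → x < cap → (PySem.List.pyGet? dp x).getD 0 = rec k p w x) :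
    bestAt (itemsOf p w k) dp cap = rec k p w cap := by
  rw [bestAt_foldl]
  apply le_antisymm
  · apply foldl_stepB_le dp cap _ _ 0 (rec_nonneg p w k cap)
    intro y hy x hx
    rw [itemsOf, List.mem_map] at hy
    obtain ⟨j, hjmem, rfl⟩ := hy
    rw [PySem.List.mem_pyRange_one] at hjmem
    have hwpos : 0 < wv w j := hg j hjmem.1 hjmem.2
    simp only [stepB]
    split_ifs with h1 h2
    · rw [hdp (cap - wv w j) (by omega) (by omega)]
      have htake := rec_take p w k j cap hg hjmem.1 hjmem.2 (by exact h1)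
      omega
    · exact hx
    · exact hx
  · exact rec_le_foldl p w dp k cap hg hdp k le_rfl hk

theorem dp_loop (p w : List Int) (k : Int) (hk : k ≤ (p.length : Int))
    (hg : ∀ t : Int, k ≤ t → t < (p.length : Int) → 0 < wv w t) (m : Nat) :
    ((PySem.List.pyRange 1 ((m : Int) + 1) 1).foldl
        (fun dp cap => dp ++ [bestAt (itemsOf p w k) dp cap]) [0]).length = m + 1 ∧
      ∀ x : Int, 0 ≤ x → x ≤ (m : Int) →
        (PySem.List.pyGet? ((PySem.List.pyRange 1 ((m : Int) + 1) 1).foldl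
            (fun dp cap => dp ++ [bestAt (itemsOf p w k) dp cap]) [0]) x).getD 0 =
          rec k p w x := by
  induction m with
  | zero =>
      rw [show ((0 : Nat) : Int) + 1 = 1 by norm_num, PySem.List.pyRange_one_eq_nil le_rfl]
      constructor
      · rfl
      · intro x hx0 hx1
        have hx : x = 0 := by omega
        subst hx
        rw [List.foldl_nil, PySem.List.pyGet?_zero_cons, Option.getD_some]
        exact (rec_zero p w k hk hg).symm
  | succ n ihn =>
      have hsplit : PySem.List.pyRange 1 (((n + 1 : Nat) : Int) + 1) 1 =
          PySem.List.pyRange 1 ((n : Int) + 1) 1 ++ [(n : Int) + 1] := by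
        have h := PySem.List.pyRange_one_succ_right (a := 1) (b := (n : Int) + 1) (by omega)
        rw [show (((n + 1 : Nat) : Int) + 1) = ((n : Int) + 1) + 1 by push_cast; ring, h]
      rw [hsplit, List.foldl_append, List.foldl_cons, List.foldl_nil]
      set dpn := (PySem.List.pyRange 1 ((n : Int) + 1) 1).foldl
        (fun dp cap => dp ++ [bestAt (itemsOf p w k) dp cap]) [0] with hdpn
      obtain ⟨hlen, hent⟩ := ihn
      have hbest : bestAt (itemsOf p w k) dpn ((n : Int) + 1) = rec k p w ((n : Int) + 1) :=
        bestAt_eq p w dpn k hk hg ((n : Int) + 1) (fun x hx0 hx1 => hent x hx0 (by omega))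
      constructor
      · simp [hlen]
      · intro x hx0 hx1
        by_cases hxn : x ≤ (n : Int)
        · rw [PySem.List.pyGet?_of_nonneg _ hx0, List.getElem?_append_left (by omega),
            ← PySem.List.pyGet?_of_nonneg _ hx0]
          exact hent x hx0 hxn
        · have hx : x = (n : Int) + 1 := by omega
          have hl : ((dpn.length : Nat) : Int) = (n : Int) + 1 := by omega
          rw [hx, ← hl, PySem.List.pyGet?_append_length, Option.getD_some, hl, hbest]

theorem rec_spec : Claim_equal_rec := by
  intro i p w c hdom hpre
  obtain ⟨hin, hi0c, hneg, hj⟩ := hpre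
  unfold Spec_rec
  by_cases hc : c < 0
  · have halt : rec_alt i p w c = 0 := by
      simp only [rec_alt, if_pos hc]
    rw [halt]
    exact rec_neg p w i c hc
  · have halt : rec_alt i p w c =
        (PySem.List.pyGet? ((PySem.List.pyRange 1 (c + 1) 1).foldl
          (fun dp cap => dp ++ [bestAt (itemsOf p w i) dp cap]) [0]) c).getD 0 := by
      simp only [rec_alt, if_neg hc]
      rfl
    rw [halt]
    rw [Int.not_lt] at hc
    have hg : ∀ t : Int, i ≤ t → t < (p.length : Int) → 0 < wv w t := by
      intro t ht1 ht2
      by_cases ht0 : 0 ≤ t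
      · obtain ⟨hw1, hw2⟩ := hj t.toNat (by omega) (by omega)
        have he : wv w t = w.getD t.toNat 0 := by
          simp only [wv, PySem.List.pyGet?_of_nonneg _ ht0, List.getD_eq_getElem?_getD]
        rw [he]
        omega
      · obtain ⟨-, hw2⟩ := hneg (t - i).toNat (by omega)
        have he : i + (((t - i).toNat : Nat) : Int) = t := by omega
        rw [he] at hw2
        simp only [wv]
        omega
    obtain ⟨hlen, hent⟩ := dp_loop p w i hin hg c.toNat
    have hcc : ((c.toNat : Nat) : Int) = c := by omega
    rw [hcc] at hlen hent
    exact (hent c hc le_rfl).symm
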